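-- pv_equiv track=rewrite | github.com/imatyukin/python | MyProjects/SAPMonitorStats/sap_monitor_stats.py | process_stat_output
-- ===== SOURCE A (Python) =====
-- def process_stat_output(output: str) -> int:
--     """Обрабатывает вывод команды monitor и извлекает статистику."""
--     egress_octets = 0
--     start_analysis = False
--     egress_found = False
--
--     for line in output.splitlines():
--         if "At time t = 11 sec (Mode: Rate)" in line:
--             start_analysis = True  # Начинаем анализ с этой строки
--         if start_analysis and "Egress" in line:
--             egress_found = True  # Найдена строка Egress
--         if start_analysis and egress_found and "Aggregate Forwarded" in line:
--             try:
--                 # Пример строки: "Aggregate Forwarded   : 100                     853855"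
--                 parts = line.split()
--                 egress_octets = int(parts[-1])  # Извлекаем последнее значение (октеты)
--                 break  # Прекращаем поиск после извлечения данных
--             except (IndexError, ValueError):
--                 egress_octets = 0  # Если не удалось извлечь значение, используем 0
--                 break
--
--     return egress_octets
-- ===== SOURCE B (Python) =====
-- def process_stat_output(output: str) -> int:
--     """Обрабатывает вывод команды monitor и извлекает статистику."""
--     pairs = list(enumerate(output.splitlines()))
--     marks = [p for p in pairs if "At time t = 11 sec (Mode: Rate)" in p[1]]
--     egrs = [p for p in pairs if "Egress" in p[1]]
--     aggs = [p for p in pairs if "Aggregate Forwarded" in p[1]]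
--     if not marks:
--         return 0
--     egrs = [p for p in egrs if p[0] >= marks[0][0]]
--     if not egrs:
--         return 0
--     aggs = [p for p in aggs if p[0] >= egrs[0][0]]
--     if not aggs:
--         return 0
--     try:
--         return int(aggs[0][1].split()[-1])
--     except (IndexError, ValueError):
--         return 0
-- ===== Notes on version B (the rewrite author's own statement) =====
-- stated objective: alternative
-- what changed: Replaces A's stateful flag-driven scan (start_analysis/egress_found booleans updated line by line with an early break) by building three whole-file keyword indexes from enumerate(lines) once, then selecting the answer purely by index filtering: first marker pair, first Egress pair at index >= it, first Aggregate Forwarded pair at index >= that, and parsing that line's last token.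
import Mathlib
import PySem

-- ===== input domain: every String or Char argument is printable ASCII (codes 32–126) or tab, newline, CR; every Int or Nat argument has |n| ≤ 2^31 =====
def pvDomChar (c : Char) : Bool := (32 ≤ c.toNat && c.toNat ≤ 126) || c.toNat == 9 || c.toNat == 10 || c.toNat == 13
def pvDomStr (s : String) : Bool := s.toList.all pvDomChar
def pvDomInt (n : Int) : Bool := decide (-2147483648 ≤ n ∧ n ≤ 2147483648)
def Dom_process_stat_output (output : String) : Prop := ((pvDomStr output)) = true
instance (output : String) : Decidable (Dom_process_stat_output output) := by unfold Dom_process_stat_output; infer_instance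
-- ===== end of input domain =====

-- B replaces A's flag-driven scan by three whole-file keyword indexes built from enumerate(lines) once, then index-filter selection (different decomposition, same cost).

-- shared leaf helper: int(line.split()[-1]) with (IndexError, ValueError) -> 0 (identical code in A and B)
def pvParseLast (l : String) : Int :=
  match PySem.List.pyGet? (PySem.Str.split₀ l) (-1) with
  | none => 0
  | some t =>
    match PySem.Int.ofStr? t with
    | none => 0
    | some v => v

-- ===== PORT A =====
def pvLoopA : List String → Bool → Bool → Int
  | [], _, _ => 0
  | l :: ls, st, eg =>
    let st' := st || PySem.Str.isIn "At time t = 11 sec (Mode: Rate)" l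
    let eg' := eg || (st' && PySem.Str.isIn "Egress" l)
    if st' && eg' && PySem.Str.isIn "Aggregate Forwarded" l then pvParseLast l
    else pvLoopA ls st' eg'

def process_stat_output (output : String) : Int :=
  pvLoopA (PySem.Str.splitlines output) false false

-- ===== PORT B =====
def process_stat_output_alt (output : String) : Int :=
  let pairs := PySem.List.enumerate (PySem.Str.splitlines output)
  let marks := pairs.filter (fun p => PySem.Str.isIn "At time t = 11 sec (Mode: Rate)" p.2)
  let egrs := pairs.filter (fun p => PySem.Str.isIn "Egress" p.2)
  let aggs := pairs.filter (fun p => PySem.Str.isIn "Aggregate Forwarded" p.2)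
  match marks with
  | [] => 0
  | m :: _ =>
    match egrs.filter (fun p => m.1 ≤ p.1) with
    | [] => 0
    | e :: _ =>
      match aggs.filter (fun p => e.1 ≤ p.1) with
      | [] => 0
      | a :: _ => pvParseLast a.2

-- ===== PRECONDITION & SPEC =====
def Spec_process_stat_output (output : String) (out : Int) : Prop := out = process_stat_output_alt output
instance (output : String) (out : Int) : Decidable (Spec_process_stat_output output out) := by unfold Spec_process_stat_output; infer_instance

-- ===== CLAIM (what is proved, stated in full; the proofs are below) =====
def Claim_equal_process_stat_output : Prop := ∀ (output : String), Dom_process_stat_output output → Spec_process_stat_output output (process_stat_output output)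

-- ===== LEMMAS AND PROOFS =====

-- proof-only canonical form: advance to the first line containing kw (the remaining suffix)
def pvSkipUntil (kw : String) : List String → List String
  | [] => []
  | l :: ls => if PySem.Str.isIn kw l then l :: ls else pvSkipUntil kw ls

def pvFinish : List String → Int
  | [] => 0
  | l :: _ => pvParseLast l

-- ---- A-side: the flag loop is the composition of three skips ----

lemma pvLoopA_tt (ls : List String) :
    pvLoopA ls true true = pvFinish (pvSkipUntil "Aggregate Forwarded" ls) := by
  induction ls with
  | nil => rfl
  | cons l ls ih =>
    by_cases h : PySem.Str.isIn "Aggregate Forwarded" l = true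
    · simp at h; simp [pvLoopA, pvSkipUntil, h, pvFinish]
    · simp at h; simp [pvLoopA, pvSkipUntil, h, ih]

lemma pvLoopA_tf (ls : List String) :
    pvLoopA ls true false =
      pvFinish (pvSkipUntil "Aggregate Forwarded" (pvSkipUntil "Egress" ls)) := by
  induction ls with
  | nil => rfl
  | cons l ls ih =>
    by_cases he : PySem.Str.isIn "Egress" l = true
    · by_cases ha : PySem.Str.isIn "Aggregate Forwarded" l = true
      · simp at he ha; simp [pvLoopA, pvSkipUntil, he, ha, pvFinish]
      · simp at he ha; simp [pvLoopA, pvSkipUntil, he, ha, pvLoopA_tt, pvFinish]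
    · simp at he; simp [pvLoopA, pvSkipUntil, he, ih]

lemma pvLoopA_ff (ls : List String) :
    pvLoopA ls false false =
      pvFinish (pvSkipUntil "Aggregate Forwarded"
        (pvSkipUntil "Egress"
          (pvSkipUntil "At time t = 11 sec (Mode: Rate)" ls))) := by
  induction ls with
  | nil => rfl
  | cons l ls ih =>
    by_cases hm : PySem.Str.isIn "At time t = 11 sec (Mode: Rate)" l = true
    · simp at hm
      have h2 : pvLoopA (l :: ls) false false = pvLoopA (l :: ls) true false := by
        simp [pvLoopA, hm]
      rw [h2, pvLoopA_tf]
      simp [pvSkipUntil, hm]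
    · simp at hm; simp [pvLoopA, pvSkipUntil, hm, ih]

-- ---- B-side: the filtered enumerate indexes describe the same skips ----

-- empty filtered index ↔ no line contains kw
lemma pvFilter_nil (kw : String) (ls : List String) (s : Int)
    (h : (PySem.List.enumerate ls s).filter (fun p => PySem.Str.isIn kw p.2) = []) :
    pvSkipUntil kw ls = [] := by
  induction ls generalizing s with
  | nil => rfl
  | cons l t ih =>
    rw [PySem.List.enumerate_cons] at h
    by_cases hl : PySem.Chars.isIn kw.toList l.toList = true
    · simp [List.filter, PySem.Str.isIn_eq, hl] at h
    · simp only [List.filter, PySem.Str.isIn_eq, hl] at h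
      simp [pvSkipUntil, PySem.Str.isIn_eq, hl]
      exact ih (s+1) h

-- head of the filtered index: its index locates the skip suffix
lemma pvFilter_cons (kw : String) (ls : List String) (s : Int) (q : Int × String)
    (rest : List (Int × String))
    (h : (PySem.List.enumerate ls s).filter (fun p => PySem.Str.isIn kw p.2) = q :: rest) :
    ∃ k : Nat, q.1 = s + k ∧ ls.drop k = q.2 :: ls.drop (k + 1) ∧
      pvSkipUntil kw ls = ls.drop k := by
  induction ls generalizing s with
  | nil => simp [PySem.List.enumerate] at h
  | cons l t ih =>
    rw [PySem.List.enumerate_cons] at h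
    by_cases hl : PySem.Chars.isIn kw.toList l.toList = true
    · simp only [List.filter, PySem.Str.isIn_eq, hl] at h
      obtain ⟨hq, -⟩ := List.cons.inj h
      refine ⟨0, ?_, ?_, ?_⟩
      · simp [← hq]
      · simp [← hq]
      · simp [pvSkipUntil, PySem.Str.isIn_eq, hl]
    · simp only [List.filter, PySem.Str.isIn_eq, hl] at h
      obtain ⟨k, hk1, hk2, hk3⟩ := ih (s + 1) h
      refine ⟨k + 1, ?_, ?_, ?_⟩
      · rw [hk1]; push_cast; ring
      · simpa using hk2
      · simp [pvSkipUntil, PySem.Str.isIn_eq, hl, hk3]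

-- re-filtering the index by "index ≥ s + k" is the index of the k-dropped suffix
lemma pvFilter_ge (kw : String) (k : Nat) :
    ∀ (ls : List String) (s : Int),
    ((PySem.List.enumerate ls s).filter (fun p => PySem.Str.isIn kw p.2)).filter
        (fun p => s + (k : Int) ≤ p.1) =
      (PySem.List.enumerate (ls.drop k) (s + k)).filter (fun p => PySem.Str.isIn kw p.2) := by
  induction k with
  | zero =>
    intro ls s
    simp only [Nat.cast_zero, add_zero, List.drop_zero]
    apply List.filter_eq_self.2
    intro p hp
    have hp' := List.mem_of_mem_filter hp
    rw [PySem.List.mem_enumerate_iff] at hp'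
    obtain ⟨j, hj, rfl⟩ := hp'
    simp
  | succ k ih =>
    intro ls s
    cases ls with
    | nil => simp [PySem.List.enumerate]
    | cons l t =>
      rw [PySem.List.enumerate_cons]
      have hcast : s + ((k + 1 : Nat) : Int) = (s + 1) + (k : Nat) := by push_cast; ring
      by_cases hl : PySem.Chars.isIn kw.toList l.toList = true
      · simp only [List.filter, PySem.Str.isIn_eq, hl]
        have hs : (decide (s + ((k + 1 : Nat) : Int) ≤ s) : Bool) = false := by
          simp only [decide_eq_false_iff_not]; push_cast; omega
        simp only [hs]
        rw [List.drop_succ_cons, hcast]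
        exact ih t (s + 1)
      · simp only [List.filter, PySem.Str.isIn_eq, hl]
        rw [List.drop_succ_cons, hcast]
        exact ih t (s + 1)

-- ===== VERDICT (by name: the statement is the Claim_ definition above) =====
theorem process_stat_output_spec : Claim_equal_process_stat_output := by
  intro output _
  unfold Spec_process_stat_output process_stat_output
  rw [pvLoopA_ff]
  show pvFinish _ = process_stat_output_alt output
  unfold process_stat_output_alt
  simp only []
  set ls := PySem.Str.splitlines output with hls
  cases hM : (PySem.List.enumerate ls 0).filter
      (fun p => PySem.Str.isIn "At time t = 11 sec (Mode: Rate)" p.2) with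
  | nil =>
    rw [pvFilter_nil _ _ _ hM]
    simp [pvSkipUntil, pvFinish]
  | cons m mrest =>
    obtain ⟨kM, hM1, -, hM3⟩ := pvFilter_cons _ _ _ _ _ hM
    simp only []
    rw [hM3, hM1, pvFilter_ge "Egress" kM ls 0]
    cases hE : (PySem.List.enumerate (ls.drop kM) (0 + (kM : Int))).filter
        (fun p => PySem.Str.isIn "Egress" p.2) with
    | nil =>
      rw [pvFilter_nil _ _ _ hE]
      simp [pvSkipUntil, pvFinish]
    | cons e erest =>
      obtain ⟨kE, hE1, -, hE3⟩ := pvFilter_cons _ _ _ _ _ hE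
      simp only []
      have he : e.1 = 0 + ((kM + kE : Nat) : Int) := by rw [hE1]; push_cast; ring
      rw [hE3, List.drop_drop, he, pvFilter_ge "Aggregate Forwarded" (kM + kE) ls 0]
      cases hA : (PySem.List.enumerate (ls.drop (kM + kE)) (0 + ((kM + kE : Nat) : Int))).filter
          (fun p => PySem.Str.isIn "Aggregate Forwarded" p.2) with
      | nil =>
        rw [pvFilter_nil _ _ _ hA]
        simp [pvFinish]
      | cons a arest =>
        obtain ⟨kA, -, hA2, hA3⟩ := pvFilter_cons _ _ _ _ _ hA
        rw [hA3, hA2]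
        simp [pvFinish]
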